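-- pv_equiv track=rewrite | github.com/tmastny/algo-design | chapter-4/4-24.py | finish_sort
-- ===== SOURCE A (Python) =====
-- from collections import deque
--
-- def finish_sort(a):
--     i = 0
--     while i < len(a) - 1 and a[i] <= a[i + 1]:
--         i += 1
--
--     merged = a[:i]
--
--     to_merge = a[i:]
--     to_merge.sort()
--
--     merged = deque(merged)
--     to_merge = deque(to_merge)
--
--     j = 0
--     temp = []
--     while len(merged) > 0 or len(to_merge) > 0:
--         if not len(merged):
--             temp.append(to_merge.popleft())
--         elif not len(to_merge):
--             temp.append(merged.popleft())
--         elif merged[0] <= to_merge[0]: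
--             temp.append(merged.popleft())
--         else:
--             temp.append(to_merge.popleft())
--
--     return temp
-- ===== SOURCE B (Python) =====
-- def finish_sort(a):
--     # The detected non-decreasing prefix and the sorted suffix merge back into
--     # the fully sorted order, so the whole body is equivalent to one full sort.
--     return sorted(a)
-- ===== Notes on version B (the rewrite author's own statement) =====
-- stated objective: simpler
-- what changed: Replaces the prefix-scan + suffix-sort + deque-merge with a single sorted(a): merging the non-decreasing prefix with the sorted suffix always yields the fully sorted list.
import Mathlib
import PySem

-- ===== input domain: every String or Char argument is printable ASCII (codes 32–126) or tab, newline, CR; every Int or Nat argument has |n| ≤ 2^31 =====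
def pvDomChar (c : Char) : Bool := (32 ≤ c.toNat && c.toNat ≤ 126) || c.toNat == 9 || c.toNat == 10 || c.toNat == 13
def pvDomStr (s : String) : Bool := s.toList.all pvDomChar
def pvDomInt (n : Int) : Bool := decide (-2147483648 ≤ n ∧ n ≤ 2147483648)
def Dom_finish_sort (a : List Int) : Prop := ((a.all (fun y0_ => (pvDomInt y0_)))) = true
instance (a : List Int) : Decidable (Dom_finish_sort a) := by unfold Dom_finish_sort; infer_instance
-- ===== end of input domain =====

-- ===== PORT A =====
-- B changes: replaces A's prefix-scan + suffix-sort + deque-merge with a single full sort (simpler; same return value, neither mutates its argument observably in the caller: A copies via slices).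
-- while i < len(a)-1 and a[i] <= a[i+1]: i += 1   (i counted structurally over adjacent pairs)
def pvScanLen : List Int → Nat
  | x :: y :: rest => if x ≤ y then pvScanLen (y :: rest) + 1 else 0
  | _ => 0

-- the final while loop popping from the two deques, branch for branch
def pvMergeLoop : List Int → List Int → List Int
  | [], [] => []
  | [], y :: ys => y :: pvMergeLoop [] ys
  | x :: xs, [] => x :: pvMergeLoop xs []
  | x :: xs, y :: ys => if x ≤ y then x :: pvMergeLoop xs (y :: ys) else y :: pvMergeLoop (x :: xs) ys

def finish_sort (a : List Int) : List Int :=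
  let i := pvScanLen a
  let merged := a.take i            -- a[:i]
  let to_merge := PySem.List.sorted (a.drop i) (fun x => x) false   -- a[i:] then .sort()
  pvMergeLoop merged to_merge

-- ===== PORT B =====
def finish_sort_alt (a : List Int) : List Int :=
  PySem.List.sorted a (fun x => x) false

-- ===== PRECONDITION & SPEC =====
def Spec_finish_sort (a : List Int) (out : List Int) : Prop := out = finish_sort_alt a
instance (a : List Int) (out : List Int) : Decidable (Spec_finish_sort a out) := by unfold Spec_finish_sort; infer_instance

-- ===== CLAIM (what is proved, stated in full; the proofs are below) =====
def Claim_equal_finish_sort : Prop := ∀ (a : List Int), Dom_finish_sort a → Spec_finish_sort a (finish_sort a)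

-- ===== LEMMAS AND PROOFS =====

-- pvMergeLoop is exactly List.merge with the (· ≤ ·) test
theorem pvMergeLoop_eq_merge (xs ys : List Int) :
    pvMergeLoop xs ys = List.merge xs ys (fun a b => a ≤ b) := by
  induction xs generalizing ys with
  | nil =>
    induction ys with
    | nil => simp [pvMergeLoop]
    | cons y ys ih => simp [pvMergeLoop, ih]
  | cons x xs ih =>
    induction ys with
    | nil => simp [pvMergeLoop, ih]
    | cons y ys ih2 =>
      simp only [pvMergeLoop, List.merge]
      by_cases h : x ≤ y
      · simp [h, ih]
      · simp [h, ih2]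

-- the first pvScanLen a elements of a are non-decreasing
theorem pvScanLen_take_pairwise (a : List Int) :
    (a.take (pvScanLen a)).Pairwise (· ≤ ·) := by
  induction a with
  | nil => simp
  | cons x t ih =>
    cases t with
    | nil => simp [pvScanLen]
    | cons y rest =>
      by_cases h : x ≤ y
      · simp only [pvScanLen, if_pos h, List.take_succ_cons]
        refine List.pairwise_cons.mpr ⟨?_, ih⟩
        intro z hz
        have hmem : z ∈ y :: rest := List.mem_of_mem_take hz
        rcases List.mem_cons.mp hmem with rfl | hz'
        · exact h
        · -- z comes after y inside a non-decreasing taken prefix headed by y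
          cases hys : pvScanLen (y :: rest) with
          | zero => rw [hys] at hz; simp at hz
          | succ n =>
            rw [hys] at hz
            have := ih
            rw [hys] at this
            simp only [List.take_succ_cons] at this hz
            rcases List.mem_cons.mp hz with rfl | hz2
            · exact h
            · have hy := (List.pairwise_cons.mp this).1 z hz2
              exact le_trans h hy
      · simp [pvScanLen, if_neg h]

theorem finish_sort_eq_sorted (a : List Int) :
    finish_sort a = PySem.List.sorted a (fun x => x) false := by
  unfold finish_sort
  simp only
  rw [pvMergeLoop_eq_merge]
  have hperm : (List.merge (a.take (pvScanLen a))
      (PySem.List.sorted (a.drop (pvScanLen a)) (fun x => x) false) (fun a b => a ≤ b)).Perm a := by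
    refine (List.merge_perm_append (fun a b : Int => decide (a ≤ b))).trans ?_
    have h1 : (a.take (pvScanLen a) ++ PySem.List.sorted (a.drop (pvScanLen a)) (fun x => x) false).Perm
        (a.take (pvScanLen a) ++ a.drop (pvScanLen a)) :=
      List.Perm.append_left _ (PySem.List.sorted_perm _ _ _)
    rw [List.take_append_drop] at h1
    exact h1
  have hpair : (List.merge (a.take (pvScanLen a))
      (PySem.List.sorted (a.drop (pvScanLen a)) (fun x => x) false) (fun a b => a ≤ b)).Pairwise (· ≤ ·) :=
    List.Pairwise.merge (pvScanLen_take_pairwise a)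
      (PySem.List.sorted_pairwise (a.drop (pvScanLen a)) (fun x => x))
  exact (PySem.List.sorted_id_eq_of_perm_of_pairwise _ _ hperm hpair).symm

-- ===== VERDICT =====
theorem finish_sort_spec : Claim_equal_finish_sort := by
  intro a _
  unfold Spec_finish_sort finish_sort_alt
  exact finish_sort_eq_sorted a
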